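-- pv_equiv track=rewrite | github.com/Smarty-Pants-Inc/botpack | botpack/tui/home_config.py | _extract_managed_block
-- ===== SOURCE A (Python) =====
-- BEGIN_MARKER = "# BEGIN BOTPACK MANAGED (do not edit by hand)"
--
-- END_MARKER = "# END BOTPACK MANAGED"
--
-- def _extract_managed_block(text: str) -> tuple[str | None, str | None, str | None]:
--     """Return (prefix, inner, suffix) if markers exist, else (None, None, None)."""
--
--     lines = text.splitlines(keepends=True)
--     b = None
--     e = None
--     for i, ln in enumerate(lines):
--         if ln.rstrip("\n") == BEGIN_MARKER:
--             b = i
--             continue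
--         if ln.rstrip("\n") == END_MARKER and b is not None:
--             e = i
--             break
--     if b is None or e is None or e <= b:
--         return (None, None, None)
--
--     prefix = "".join(lines[:b])
--     inner = "".join(lines[b + 1 : e])
--     suffix = "".join(lines[e + 1 :])
--     return (prefix, inner, suffix)
-- ===== SOURCE B (Python) =====
-- BEGIN_MARKER = "# BEGIN BOTPACK MANAGED (do not edit by hand)"
--
-- END_MARKER = "# END BOTPACK MANAGED"
--
-- def _extract_managed_block(text: str) -> tuple[str | None, str | None, str | None]:
--     """Return (prefix, inner, suffix) if markers exist, else (None, None, None)."""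
--     lines = text.splitlines(keepends=True)
--     begins = [i for i, ln in enumerate(lines) if ln.rstrip("\n") == BEGIN_MARKER]
--     ends = [i for i, ln in enumerate(lines) if ln.rstrip("\n") == END_MARKER]
--     # pick the first end line that has some begin line before it,
--     # and the last begin line before that end
--     for e in ends:
--         befores = [b for b in begins if b < e]
--         if befores:
--             b = befores[-1]
--             return ("".join(lines[:b]), "".join(lines[b + 1:e]), "".join(lines[e + 1:]))
--     return (None, None, None)
-- ===== Notes on version B (the rewrite author's own statement) =====
-- stated objective: alternative
-- what changed: Replaces the single-pass state machine (last-begin register, break on end) by computing the begin/end marker index lists up front, then choosing the first end with a begin before it and the last begin before that end.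
import Mathlib
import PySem

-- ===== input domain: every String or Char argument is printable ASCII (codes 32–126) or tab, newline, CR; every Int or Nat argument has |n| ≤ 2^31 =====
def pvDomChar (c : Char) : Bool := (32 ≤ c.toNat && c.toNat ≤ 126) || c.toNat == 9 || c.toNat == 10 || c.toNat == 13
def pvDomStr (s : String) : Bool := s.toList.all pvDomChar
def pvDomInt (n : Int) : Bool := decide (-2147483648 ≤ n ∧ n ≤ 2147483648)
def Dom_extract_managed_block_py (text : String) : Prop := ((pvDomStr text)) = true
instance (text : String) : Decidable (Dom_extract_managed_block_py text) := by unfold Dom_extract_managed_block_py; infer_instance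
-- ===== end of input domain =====

-- B computes the begin/end marker index lists up front and scans the end list,
-- instead of A's single-pass state machine; objective: alternative decomposition (same cost).


-- ===== PORT A =====
def pvBeginM : List Char := "# BEGIN BOTPACK MANAGED (do not edit by hand)".toList

def pvEndM : List Char := "# END BOTPACK MANAGED".toList

-- text.splitlines(keepends=True), hand-ported: exact on the Dom alphabet, whose only
-- line breaks are '\n', '\r' and '\r\n' (cur holds the current line reversed)
def pvSplitK (cur : List Char) : List Char → List (List Char)
  | [] => if cur.isEmpty then [] else [cur.reverse]
  | '\r' :: '\n' :: rest => (cur.reverse ++ ['\r', '\n']) :: pvSplitK [] rest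
  | '\r' :: rest => (cur.reverse ++ ['\r']) :: pvSplitK [] rest
  | '\n' :: rest => (cur.reverse ++ ['\n']) :: pvSplitK [] rest
  | c :: rest => pvSplitK (c :: cur) rest
  termination_by l => l.length

-- ln.rstrip("\n"), hand-ported: drop trailing '\n' characters (exact)
def pvRstripNl (cs : List Char) : List Char := (cs.reverse.dropWhile (· == '\n')).reverse

def pvIsB (ln : List Char) : Bool := pvRstripNl ln == pvBeginM

def pvIsE (ln : List Char) : Bool := pvRstripNl ln == pvEndM

-- "".join ported as Chars.join with empty separator (exact); the returned triple,
-- literally the common return expression of both Pythons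
def pvOut (lines : List (List Char)) (b e : Int) : Option String × Option String × Option String :=
  (some (String.ofList (PySem.Chars.join [] (PySem.List.slice lines none (some b)))),
   some (String.ofList (PySem.Chars.join [] (PySem.List.slice lines (some (b + 1)) (some e)))),
   some (String.ofList (PySem.Chars.join [] (PySem.List.slice lines (some (e + 1)) none))))

-- A's for-loop over enumerate(lines) with state b, breaking at the first matching end
def pvLoopA : List (List Char) → Int → Option Int → Option Int × Option Int
  | [], _, b => (b, none)
  | ln :: rest, i, b =>
    if pvIsB ln then pvLoopA rest (i + 1) (some i)
    else if pvIsE ln && b.isSome then (b, some i)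
    else pvLoopA rest (i + 1) b

def extract_managed_block_py (text : String) : Option String × Option String × Option String :=
  let lines := pvSplitK [] text.toList
  match pvLoopA lines 0 none with
  | (some b, some e) => if e ≤ b then (none, none, none) else pvOut lines b e
  | _ => (none, none, none)

-- ===== PORT B =====
-- the two index-list comprehensions of Source B
def pvBegins (l : List (List Char)) (s : Int) : List Int :=
  ((PySem.List.enumerate l s).filter (fun p => pvIsB p.2)).map Prod.fst

def pvEnds (l : List (List Char)) (s : Int) : List Int :=
  ((PySem.List.enumerate l s).filter (fun p => pvIsE p.2)).map Prod.fst

-- Source B's for-loop over ends: first end with a begin before it, last such begin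
def pvLoopB (lines : List (List Char)) (begins : List Int) : List Int → Option String × Option String × Option String
  | [] => (none, none, none)
  | e :: rest =>
    match (begins.filter (fun i => decide (i < e))).getLast? with
    | some b => pvOut lines b e
    | none => pvLoopB lines begins rest

def extract_managed_block_py_alt (text : String) : Option String × Option String × Option String :=
  let lines := pvSplitK [] text.toList
  pvLoopB lines (pvBegins lines 0) (pvEnds lines 0)

-- ===== PRECONDITION & SPEC =====
def Spec_extract_managed_block_py (text : String) (out : Option String × Option String × Option String) : Prop := out = extract_managed_block_py_alt text
instance (text : String) (out : Option String × Option String × Option String) : Decidable (Spec_extract_managed_block_py text out) := by unfold Spec_extract_managed_block_py; infer_instance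

-- ===== CLAIM (what is proved, stated in full; the proofs are below) =====
def Claim_equal_extract_managed_block_py : Prop := ∀ (text : String), Dom_extract_managed_block_py text → Spec_extract_managed_block_py text (extract_managed_block_py text)

-- ===== LEMMAS AND PROOFS =====

-- common reading of both loops: the first end with (a carried or listed) begin before it,
-- together with the last begin before it (carried begin as fallback)
def pvSpecCore (b : Option Int) (begins ends : List Int) : Option Int × Option Int :=
  match ends.find? (fun j => b.isSome || begins.any (fun x => decide (x < j))) with
  | none => (begins.getLast?.or b, none)
  | some e => ((begins.filter (fun x => decide (x < e))).getLast?.or b, some e)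

theorem pv_find?_congr {α : Type} (l : List α) (p q : α → Bool) (h : ∀ a ∈ l, p a = q a) :
    l.find? p = l.find? q := by
  induction l with
  | nil => rfl
  | cons a t ih =>
    simp only [List.find?_cons]
    rw [h a (by simp)]
    cases q a
    · exact ih (fun x hx => h x (by simp [hx]))
    · rfl

theorem pv_getLast?_cons {α : Type} (a : α) (l : List α) :
    (a :: l).getLast? = l.getLast?.or (some a) := by
  cases l with
  | nil => rfl
  | cons b t =>
    rw [List.getLast?_cons_cons]
    cases h : (b :: t).getLast? with
    | none => exact absurd (List.getLast?_eq_none_iff.mp h) (by simp)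
    | some x => rfl
 
theorem pv_mem_pvBegins {l : List (List Char)} {s j : Int} (h : j ∈ pvBegins l s) : s ≤ j := by
  simp only [pvBegins, List.mem_map, List.mem_filter] at h
  obtain ⟨p, ⟨hp, _⟩, rfl⟩ := h
  rw [PySem.List.mem_enumerate_iff] at hp
  obtain ⟨k, _, rfl⟩ := hp
  simp

theorem pv_mem_pvEnds {l : List (List Char)} {s j : Int} (h : j ∈ pvEnds l s) : s ≤ j := by
  simp only [pvEnds, List.mem_map, List.mem_filter] at h
  obtain ⟨p, ⟨hp, _⟩, rfl⟩ := h
  rw [PySem.List.mem_enumerate_iff] at hp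
  obtain ⟨k, _, rfl⟩ := hp
  simp

theorem pv_not_both (ln : List Char) : pvIsB ln = true → pvIsE ln = false := by
  simp only [pvIsB, pvIsE, beq_iff_eq, beq_eq_false_iff_ne]
  intro h
  rw [h]
  decide

theorem pvBegins_cons (ln : List Char) (l : List (List Char)) (s : Int) :
    pvBegins (ln :: l) s = if pvIsB ln then s :: pvBegins l (s + 1) else pvBegins l (s + 1) := by
  simp only [pvBegins, PySem.List.enumerate_cons, List.filter_cons]
  by_cases h : pvIsB ln = true <;> simp [h]

theorem pvEnds_cons (ln : List Char) (l : List (List Char)) (s : Int) :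
    pvEnds (ln :: l) s = if pvIsE ln then s :: pvEnds l (s + 1) else pvEnds l (s + 1) := by
  simp only [pvEnds, PySem.List.enumerate_cons, List.filter_cons]
  by_cases h : pvIsE ln = true <;> simp [h]

theorem pv_loopA_eq (l : List (List Char)) : ∀ (s : Int) (b : Option Int),
    pvLoopA l s b = pvSpecCore b (pvBegins l s) (pvEnds l s) := by
  induction l with
  | nil => intro s b; simp [pvLoopA, pvBegins, pvEnds, pvSpecCore, PySem.List.enumerate_nil]
  | cons ln rest ih =>
    intro s b
    rw [pvBegins_cons, pvEnds_cons]
    by_cases hb : pvIsB ln = true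
    · rw [if_pos hb, if_neg (by simp [pv_not_both ln hb])]
      show pvLoopA (ln :: rest) s b = _
      rw [pvLoopA, if_pos hb, ih]
      -- both sides: pvSpecCore over pvEnds rest (s+1); preds agree (both true) on members
      unfold pvSpecCore
      rw [pv_find?_congr (pvEnds rest (s + 1))
            (fun j => (some s).isSome || (pvBegins rest (s + 1)).any (fun x => decide (x < j)))
            (fun j => b.isSome || (s :: pvBegins rest (s + 1)).any (fun x => decide (x < j)))
            (by
              intro j hj
              have hs : s + 1 ≤ j := pv_mem_pvEnds hj
              simp only [Option.isSome_some, Bool.true_or, List.any_cons]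
              have : decide (s < j) = true := by simp; omega
              simp [this])]
      cases hfind : (pvEnds rest (s + 1)).find?
          (fun j => b.isSome || (s :: pvBegins rest (s + 1)).any (fun x => decide (x < j))) with
      | none =>
        simp only [pv_getLast?_cons, Option.or_assoc, Option.some_or]
      | some e =>
        have he : s < e := by
          have := pv_mem_pvEnds (List.mem_of_find?_eq_some hfind)
          omega
        simp only [List.filter_cons, decide_eq_true_eq]
        rw [if_pos (by simpa using he)]
        simp only [pv_getLast?_cons, Option.or_assoc, Option.some_or]
    · rw [if_neg hb]
      by_cases he : pvIsE ln = true
      · rw [if_pos he]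
        show pvLoopA (ln :: rest) s b = _
        rw [pvLoopA, if_neg hb]
        cases b with
        | some bv =>
          rw [if_pos (by simp [he])]
          unfold pvSpecCore
          rw [List.find?_cons_of_pos (by simp)]
          have hfil : (pvBegins rest (s + 1)).filter (fun x => decide (x < s)) = [] := by
            rw [List.filter_eq_nil_iff]
            intro x hx
            have := pv_mem_pvBegins hx
            simp; omega
          simp [hfil, Option.or]
        | none =>
          rw [if_neg (by simp)]
          rw [ih]
          unfold pvSpecCore
          rw [List.find?_cons_of_neg (by
            simp only [Option.isSome_none, Bool.false_or, List.any_eq_true, not_exists]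
            intro x hx
            have h1 := pv_mem_pvBegins hx.1
            have h2 : x < s := by simpa using hx.2
            omega)]
      · rw [if_neg he]
        show pvLoopA (ln :: rest) s b = _
        rw [pvLoopA, if_neg hb, if_neg (by simp [he]), ih]

theorem pv_loopB_eq (lines : List (List Char)) (begins : List Int) : ∀ (ends : List Int),
    pvLoopB lines begins ends =
      match ends.find? (fun j => begins.any (fun x => decide (x < j))) with
      | none => (none, none, none)
      | some e =>
        match (begins.filter (fun x => decide (x < e))).getLast? with
        | some b => pvOut lines b e
        | none => (none, none, none) := by
  intro ends
  induction ends with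
  | nil => rfl
  | cons e rest ih =>
    rw [pvLoopB]
    cases hlast : (begins.filter (fun i => decide (i < e))).getLast? with
    | some b =>
      have hne : begins.filter (fun i => decide (i < e)) ≠ [] := by
        intro h; rw [h] at hlast; simp at hlast
      have hany : begins.any (fun x => decide (x < e)) = true := by
        rw [List.any_eq_true]
        obtain ⟨x, hx⟩ := List.exists_mem_of_ne_nil _ hne
        exact ⟨x, (List.mem_filter.mp hx).1, (List.mem_filter.mp hx).2⟩
      rw [List.find?_cons_of_pos (p := fun j => begins.any fun x => decide (x < j)) hany]
      simp [hlast]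
    | none =>
      have hnil : begins.filter (fun i => decide (i < e)) = [] := by
        simpa using hlast
      have hany : begins.any (fun x => decide (x < e)) = false := by
        simp only [List.any_eq_false, Bool.not_eq_true]
        intro x hx
        by_contra hcon
        have : x ∈ begins.filter (fun i => decide (i < e)) :=
          List.mem_filter.mpr ⟨hx, by simpa using hcon⟩
        simp [hnil] at this
      rw [List.find?_cons_of_neg (p := fun j => begins.any fun x => decide (x < j)) (by simp [hany])]
      exact ih

-- ===== VERDICT (by name: the statement is the Claim_ definition above) =====
theorem extract_managed_block_py_spec : Claim_equal_extract_managed_block_py := by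
  intro text _
  unfold Spec_extract_managed_block_py
  simp only [extract_managed_block_py, extract_managed_block_py_alt]
  generalize pvSplitK [] text.toList = lines
  rw [pv_loopA_eq, pv_loopB_eq]
  unfold pvSpecCore
  cases hfind : (pvEnds lines 0).find?
      (fun j => (none : Option Int).isSome || (pvBegins lines 0).any (fun x => decide (x < j))) with
  | none =>
    have : (pvEnds lines 0).find? (fun j => (pvBegins lines 0).any (fun x => decide (x < j))) = none := by
      rw [← hfind]; exact pv_find?_congr _ _ _ (by simp)
    simp only [this]
    cases (pvBegins lines 0).getLast?.or none <;> rfl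
  | some e =>
    have hfind' : (pvEnds lines 0).find? (fun j => (pvBegins lines 0).any (fun x => decide (x < j))) = some e := by
      rw [← hfind]; exact pv_find?_congr _ _ _ (by simp)
    simp only [hfind']
    have hpred : (pvBegins lines 0).any (fun x => decide (x < e)) = true := by
      have := List.find?_some hfind
      simpa using this
    have hne : (pvBegins lines 0).filter (fun x => decide (x < e)) ≠ [] := by
      rw [List.any_eq_true] at hpred
      obtain ⟨x, hx, hxe⟩ := hpred
      intro h
      have : x ∈ (pvBegins lines 0).filter (fun x => decide (x < e)) :=
        List.mem_filter.mpr ⟨hx, hxe⟩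
      simp [h] at this
    cases hlast : ((pvBegins lines 0).filter (fun x => decide (x < e))).getLast? with
    | none => exact absurd (by simpa using hlast) hne
    | some b =>
      have hb : b ∈ (pvBegins lines 0).filter (fun x => decide (x < e)) :=
        List.mem_of_getLast? hlast
      have hblt : b < e := by
        have := List.of_mem_filter hb
        simpa using this
      simp only [Option.or_none]
      rw [if_neg (by omega)]
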